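-- pv_equiv track=rewrite | github.com/vanshksingh/PythonProject1 | ARCHIVE/gem.py | generate_toc
-- ===== SOURCE A (Python) =====
-- from typing import List, Dict, Any, Optional
--
-- def format_id(idx: int) -> str:
--     """Standardizes IDs to 4-digit strings (0001, 0002) for efficiency."""
--     return f"{idx:04d}"
--
-- def generate_toc(chunks: List[Dict]) -> List[Dict]:
--     """Creates a high-level map of the document by looking at the start of chunks."""
--     toc = []
--     current_chapter = "Introduction / Start"
--     start_id = "0000"
--
--     for i, c in enumerate(chunks):
--         content_sample = c['content'][:150].lower()
--         # Heuristic for Chapter/Section detection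
--         if any(x in content_sample for x in ["chapter", "section", "table of contents"]):
--             if i > 0:
--                 toc.append({"title": current_chapter, "range": f"{start_id}-{format_id(i - 1)}"})
--             current_chapter = c['content'].split('\n')[0][:60].strip()
--             start_id = format_id(i)
--
--     toc.append({"title": current_chapter, "range": f"{start_id}-{format_id(len(chunks) - 1)}"})
--     return toc
-- ===== SOURCE B (Python) =====
-- def format_id(idx: int) -> str:
--     return f"{idx:04d}"
--
-- def _is_boundary(c) -> bool:
--     sample = c['content'][:150].lower()
--     return "chapter" in sample or "section" in sample or "table of contents" in sample
--
-- def _title(c) -> str: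
--     return c['content'].split('\n')[0][:60].strip()
--
-- def generate_toc(chunks):
--     bounds = [(i, c) for i, c in enumerate(chunks) if _is_boundary(c)]
--     starts = bounds if bounds and bounds[0][0] == 0 else [(0, None)] + bounds
--     ends = [i - 1 for i, _ in starts[1:]] + [len(chunks) - 1]
--     return [{"title": "Introduction / Start" if c is None else _title(c),
--              "range": f"{format_id(s)}-{format_id(e)}"}
--             for (s, c), e in zip(starts, ends)]
-- ===== Notes on version B (the rewrite author's own statement) =====
-- stated objective: alternative
-- what changed: Replaced A's stateful accumulator loop (carrying current title/start id and appending on the next boundary) by computing the boundary index list once, building the segment-start list with its paired ends via zip, and emitting one entry per segment.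
import Mathlib
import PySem

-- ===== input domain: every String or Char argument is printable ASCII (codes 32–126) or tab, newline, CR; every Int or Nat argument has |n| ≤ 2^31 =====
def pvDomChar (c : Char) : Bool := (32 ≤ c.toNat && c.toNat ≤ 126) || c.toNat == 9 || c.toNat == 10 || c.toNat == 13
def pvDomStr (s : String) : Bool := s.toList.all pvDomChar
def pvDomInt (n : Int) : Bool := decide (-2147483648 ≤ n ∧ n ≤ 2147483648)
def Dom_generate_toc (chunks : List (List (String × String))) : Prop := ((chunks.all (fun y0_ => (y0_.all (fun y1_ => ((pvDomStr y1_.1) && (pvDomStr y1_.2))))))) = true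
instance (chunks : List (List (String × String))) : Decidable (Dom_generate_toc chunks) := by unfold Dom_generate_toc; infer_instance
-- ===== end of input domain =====

-- B replaces A's stateful accumulator loop by a boundary-list + zip-of-segment-starts construction (alternative decomposition, same cost).

-- ===== PORT A =====
-- f"{idx:04d}" : zero-pad to width 4, sign in front (exact: zfill)
def format_id (idx : Int) : String := PySem.Str.zfill (PySem.Int.toStr idx) 4

-- c['content']; exact under Pre_ (every chunk has the key)
def pvContent (c : List (String × String)) : String := (PySem.Dict.mk c).getD "content" ""

-- any(x in c['content'][:150].lower() for x in ["chapter", "section", "table of contents"])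
def pvIsBoundary (c : List (String × String)) : Bool :=
  let sample := PySem.Str.lower (PySem.Str.slice (pvContent c) none (some 150))
  PySem.Str.isIn "chapter" sample || PySem.Str.isIn "section" sample ||
    PySem.Str.isIn "table of contents" sample

-- c['content'].split('\n')[0][:60].strip()
def pvTitle (c : List (String × String)) : String :=
  PySem.Str.strip (PySem.Str.slice (((PySem.Str.split? (pvContent c) "\n").getD []).headD "") none (some 60))

-- {"title": t, "range": r}
def pvEntry (t r : String) : List (String × String) := [("title", t), ("range", r)]

-- the body of A's for-loop (state = (toc, current_chapter, start_id))
def pvStepA (st : List (List (String × String)) × String × String)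
    (p : Int × List (String × String)) : List (List (String × String)) × String × String :=
  if pvIsBoundary p.2 then
    ((if p.1 > 0 then st.1 ++ [pvEntry st.2.1 (st.2.2 ++ "-" ++ format_id (p.1 - 1))] else st.1),
      pvTitle p.2, format_id p.1)
  else st

def generate_toc (chunks : List (List (String × String))) : List (List (String × String)) :=
  let r := (PySem.List.enumerate chunks).foldl pvStepA ([], "Introduction / Start", "0000")
  r.1 ++ [pvEntry r.2.1 (r.2.2 ++ "-" ++ format_id ((chunks.length : Int) - 1))]

-- ===== PORT B =====
-- one toc entry from ((start index, None-or-chunk), end index)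
def pvMkB (pe : (Int × Option (List (String × String))) × Int) : List (String × String) :=
  pvEntry (match pe.1.2 with | none => "Introduction / Start" | some c => pvTitle c)
    (format_id pe.1.1 ++ "-" ++ format_id pe.2)

def generate_toc_alt (chunks : List (List (String × String))) : List (List (String × String)) :=
  let bounds := (PySem.List.enumerate chunks).filter (fun p => pvIsBoundary p.2)
  let starts : List (Int × Option (List (String × String))) :=
    if bounds.head?.map Prod.fst == some 0 then bounds.map (fun p => (p.1, some p.2))
    else (0, none) :: bounds.map (fun p => (p.1, some p.2))
  let ends : List Int := starts.tail.map (fun p => p.1 - 1) ++ [(chunks.length : Int) - 1]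
  (starts.zip ends).map pvMkB

-- ===== PRECONDITION & SPEC =====
-- Pre_ excludes chunk dicts without a "content" key: the Python A (and B) raise KeyError there.
def Pre_generate_toc (chunks : List (List (String × String))) : Prop :=
  ∀ c ∈ chunks, (PySem.Dict.mk c).contains "content" = true
instance (chunks : List (List (String × String))) : Decidable (Pre_generate_toc chunks) := by
  unfold Pre_generate_toc; infer_instance

def pvWitness_generate_toc : (List (List (String × String))) :=
  [[("content", "Chapter 1\nIntro")], [("content", "plain text")]]

def Spec_generate_toc (chunks : List (List (String × String))) (out : List (List (String × String))) : Prop := out = generate_toc_alt chunks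
instance (chunks : List (List (String × String))) (out : List (List (String × String))) : Decidable (Spec_generate_toc chunks out) := by unfold Spec_generate_toc; infer_instance

-- ===== CLAIM (what is proved, stated in full; the proofs are below) =====
def Claim_equal_generate_toc : Prop := ∀ (chunks : List (List (String × String))), Dom_generate_toc chunks → Pre_generate_toc chunks → Spec_generate_toc chunks (generate_toc chunks)

-- ===== LEMMAS AND PROOFS =====

-- characterization of A's loop: segments generated from position i0 with pending (cur, sid)
def pvCore (i0 : Int) (cur sid : String) :
    List (List (String × String)) → List (List (String × String))
  | [] => [pvEntry cur (sid ++ "-" ++ format_id (i0 - 1))]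
  | c :: rest =>
    if pvIsBoundary c then
      (if i0 > 0 then [pvEntry cur (sid ++ "-" ++ format_id (i0 - 1))] else []) ++
        pvCore (i0 + 1) (pvTitle c) (format_id i0) rest
    else pvCore (i0 + 1) cur sid rest

-- characterization of B's zip/map: one entry per start, end = next start - 1 or last
def pvSegs (last : Int) :
    List (Int × Option (List (String × String))) → List (List (String × String))
  | [] => []
  | (s, oc) :: rest =>
    pvEntry (match oc with | none => "Introduction / Start" | some c => pvTitle c)
        (format_id s ++ "-" ++ format_id (match rest with | [] => last | (s', _) :: _ => s' - 1))
      :: pvSegs last rest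

lemma foldA (rest : List (List (String × String))) :
    ∀ (i0 : Int) (toc : List (List (String × String))) (cur sid : String),
    (let r := (PySem.List.enumerate rest i0).foldl pvStepA (toc, cur, sid);
      r.1 ++ [pvEntry r.2.1 (r.2.2 ++ "-" ++ format_id (i0 + rest.length - 1))])
    = toc ++ pvCore i0 cur sid rest := by
  induction rest with
  | nil =>
    intro i0 toc cur sid
    simp [PySem.List.enumerate, pvCore]
  | cons c rest ih =>
    intro i0 toc cur sid
    rw [PySem.List.enumerate_cons]
    simp only [List.foldl_cons]
    have hlen : i0 + (c :: rest).length - 1 = (i0 + 1) + rest.length - 1 := by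
      simp only [List.length_cons]; push_cast; ring
    by_cases hb : pvIsBoundary c
    · by_cases hi : i0 > 0
      · have := ih (i0 + 1) (toc ++ [pvEntry cur (sid ++ "-" ++ format_id (i0 - 1))])
          (pvTitle c) (format_id i0)
        simp only at this ⊢
        rw [hlen, show pvStepA (toc, cur, sid) (i0, c)
            = (toc ++ [pvEntry cur (sid ++ "-" ++ format_id (i0 - 1))], pvTitle c, format_id i0) by
          simp [pvStepA, hb, hi]]
        rw [this]
        simp [pvCore, hb, hi]
      · have := ih (i0 + 1) toc (pvTitle c) (format_id i0)
        simp only at this ⊢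
        rw [hlen, show pvStepA (toc, cur, sid) (i0, c) = (toc, pvTitle c, format_id i0) by
          simp [pvStepA, hb, hi]]
        rw [this]
        simp [pvCore, hb, hi]
    · have := ih (i0 + 1) toc cur sid
      simp only at this ⊢
      rw [hlen, show pvStepA (toc, cur, sid) (i0, c) = (toc, cur, sid) by
        simp [pvStepA, hb]]
      rw [this]
      simp [pvCore, hb]

lemma zip_segs :
    ∀ (starts : List (Int × Option (List (String × String)))) (last : Int),
    (starts.zip (starts.tail.map (fun p => p.1 - 1) ++ [last])).map pvMkB
      = pvSegs last starts := by
  intro starts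
  induction starts with
  | nil => intro last; simp [pvSegs]
  | cons p rest ih =>
    intro last
    cases rest with
    | nil => cases p with | mk s oc => simp [pvSegs, pvMkB]
    | cons q rest' =>
      simp only [List.tail_cons, List.map_cons, List.cons_append, List.zip_cons_cons,
        List.map_cons]
      rw [show (q :: rest').zip ((rest'.map (fun p => p.1 - 1)) ++ [last])
            = (q :: rest').zip (((q :: rest').tail.map (fun p => p.1 - 1)) ++ [last]) by simp]
      rw [ih last]
      cases p with | mk s oc => cases q with | mk s' oc' => simp [pvSegs, pvMkB]

-- the boundary (index, chunk) pairs of rest, indices starting at i0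
def pvBnds (i0 : Int) (rest : List (List (String × String))) :
    List (Int × List (String × String)) :=
  (PySem.List.enumerate rest i0).filter (fun p => pvIsBoundary p.2)

lemma core_segs (rest : List (List (String × String))) :
    ∀ (i0 : Int) (cur sid : String), 0 < i0 →
    pvCore i0 cur sid rest =
      pvEntry cur (sid ++ "-" ++ format_id
          (match pvBnds i0 rest with | [] => i0 + rest.length - 1 | (s, _) :: _ => s - 1))
        :: pvSegs (i0 + rest.length - 1) ((pvBnds i0 rest).map (fun p => (p.1, some p.2))) := by
  induction rest with
  | nil =>
    intro i0 cur sid _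
    simp [pvCore, pvBnds, PySem.List.enumerate, pvSegs]
  | cons c rest ih =>
    intro i0 cur sid hi
    have hlen : i0 + ((rest.length : Int) + 1) - 1 = (i0 + 1) + rest.length - 1 := by ring
    by_cases hb : pvIsBoundary c
    · have hbn : pvBnds i0 (c :: rest) = (i0, c) :: pvBnds (i0 + 1) rest := by
        simp [pvBnds, PySem.List.enumerate_cons, hb]
      rw [show pvCore i0 cur sid (c :: rest)
          = (if i0 > 0 then [pvEntry cur (sid ++ "-" ++ format_id (i0 - 1))] else []) ++
            pvCore (i0 + 1) (pvTitle c) (format_id i0) rest by simp [pvCore, hb]]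
      rw [hbn, if_pos hi, ih (i0 + 1) (pvTitle c) (format_id i0) (by omega)]
      cases hr : pvBnds (i0 + 1) rest with
      | nil => simp [pvSegs, hlen]
      | cons b bs => cases b with | mk s' c' => simp [pvSegs, hlen]
    · have hbn : pvBnds i0 (c :: rest) = pvBnds (i0 + 1) rest := by
        simp [pvBnds, PySem.List.enumerate_cons, hb]
      rw [show pvCore i0 cur sid (c :: rest) = pvCore (i0 + 1) cur sid rest by
        simp [pvCore, hb]]
      rw [hbn, ih (i0 + 1) cur sid (by omega)]
      simp [hlen]

lemma enum_ge (rest : List (List (String × String))) :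
    ∀ (i0 : Int) (p : Int × List (String × String)),
    p ∈ PySem.List.enumerate rest i0 → i0 ≤ p.1 := by
  induction rest with
  | nil => intro i0 p h; simp [PySem.List.enumerate] at h
  | cons c rest ih =>
    intro i0 p h
    rw [PySem.List.enumerate_cons] at h
    rcases List.mem_cons.1 h with h | h
    · simp [h]
    · have := ih (i0 + 1) p h; omega

lemma fid_zero : format_id 0 = "0000" := by decide

theorem generate_toc_eq (chunks : List (List (String × String))) :
    generate_toc chunks = generate_toc_alt chunks := by
  have hA : generate_toc chunks = pvCore 0 "Introduction / Start" "0000" chunks := by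
    have := foldA chunks 0 [] "Introduction / Start" "0000"
    simp only at this
    simpa [generate_toc] using this
  rw [hA]
  cases chunks with
  | nil => decide
  | cons c rest =>
    have hlast : ((c :: rest).length : Int) - 1 = 1 + (rest.length : Int) - 1 := by
      simp only [List.length_cons]; push_cast; ring
    by_cases hb : pvIsBoundary c
    · -- first chunk is a boundary: starts = bounds, no Introduction entry
      have hbn : (PySem.List.enumerate (c :: rest)).filter (fun p => pvIsBoundary p.2)
          = (0, c) :: pvBnds 1 rest := by
        simp [pvBnds, PySem.List.enumerate_cons, hb]
      simp only [generate_toc_alt, hbn, List.head?_cons, Option.map_some, beq_self_eq_true,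
        if_pos]
      rw [zip_segs]
      rw [show pvCore 0 "Introduction / Start" "0000" (c :: rest)
          = pvCore 1 (pvTitle c) (format_id 0) rest by simp [pvCore, hb]]
      rw [core_segs rest 1 (pvTitle c) (format_id 0) (by omega), hlast]
      cases hr : pvBnds 1 rest with
      | nil => simp [pvSegs]
      | cons b bs => cases b with | mk s' c' => simp [pvSegs]
    · -- first chunk is not a boundary: Introduction segment is prepended
      have hbn : (PySem.List.enumerate (c :: rest)).filter (fun p => pvIsBoundary p.2)
          = pvBnds 1 rest := by
        simp [pvBnds, PySem.List.enumerate_cons, hb]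
      have hcond : ((pvBnds 1 rest).head?.map Prod.fst == some 0) = false := by
        cases hr : pvBnds 1 rest with
        | nil => rfl
        | cons b bs =>
          cases b with
          | mk s' c' =>
            have hmem : (s', c') ∈ PySem.List.enumerate rest 1 :=
              List.mem_of_mem_filter (by rw [show (PySem.List.enumerate rest 1).filter
                (fun p => pvIsBoundary p.2) = pvBnds 1 rest from rfl, hr]; exact List.mem_cons_self ..)
            have hs : (1 : Int) ≤ s' := enum_ge rest 1 (s', c') hmem
            simp only [List.head?_cons, Option.map_some, beq_eq_false_iff_ne, ne_eq,
              Option.some.injEq]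
            omega
      simp only [generate_toc_alt, hbn, hcond]
      rw [zip_segs]
      rw [show pvCore 0 "Introduction / Start" "0000" (c :: rest)
          = pvCore 1 "Introduction / Start" "0000" rest by simp [pvCore, hb]]
      rw [core_segs rest 1 "Introduction / Start" "0000" (by omega), hlast]
      cases hr : pvBnds 1 rest with
      | nil => simp [pvSegs, fid_zero]
      | cons b bs => cases b with | mk s' c' => simp [pvSegs, fid_zero]

-- ===== VERDICT (by name: the statement is the Claim_ definition above) =====
theorem generate_toc_spec : Claim_equal_generate_toc := by
  intro chunks _ _
  unfold Spec_generate_toc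
  exact generate_toc_eq chunks
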